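-- pv_equiv track=rewrite | github.com/acmeism/RosettaCodeData | Task/Sailors-coconuts-and-a-monkey-problem/Python/sailors-coconuts-and-a-monkey-problem-3.py | calcnuts
-- ===== SOURCE A (Python) =====
-- def dioph(a, b, c):
-- 	aa,bb,x,y = a, b, 0, 1
--
-- 	while True:
-- 		q,a,b = a//b, b, a%b
-- 		x,y = y - q*x, x
-- 		if abs(a) == 1: break
--
-- 	if y*aa % bb != 1: y = -y
-- 	x,y = y*c, (c - aa*y*c)//bb
-- 	#assert(x*aa + y*bb == c)
-- 	return x,y
--
-- def calcnuts(rems, min_share = 0):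
-- 	n, r = len(rems) - 1, 0
-- 	c = (n - 1)**n
-- 	for x in rems: r,c = r + x*c, c//(n-1)*n
--
-- 	a, b = (n-1)**n, n**(n+1)
-- 	x, y = dioph(a, -b, r)
-- 	k = (min_share - y + a - 1)//a
-- 	return x + k*b, y + k*a
-- ===== SOURCE B (Python) =====
-- def calcnuts(rems, min_share = 0):
-- 	n = len(rems) - 1
-- 	m = n - 1
-- 	a, b = m**n, n**(n+1)
-- 	# r = sum(rems[i] * m**(n-i) * n**i) by Horner evaluation from the right
-- 	r, mp = 0, 1
-- 	for x in reversed(rems):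
-- 		r, mp = x*mp + n*r, mp*m
-- 	# inverse of b modulo a = m**n by Hensel lifting from b = 1 (mod m)
-- 	inv, e = 1, 1
-- 	while e < n:
-- 		e = min(2*e, n)
-- 		inv = inv * (2 - b*inv) % m**e
-- 	y0 = (-r * inv) % a
-- 	Y = min_share + ((y0 - min_share) % a)
-- 	return (r + b*Y) // a, Y
-- ===== Notes on version B (the rewrite author's own statement) =====
-- stated objective: faster
-- what changed: Replaces the extended-Euclid Bezout solver with Hensel (quadratic) lifting of the trivial inverse b=1 mod (n-1) to an inverse mod (n-1)^n, and the forward fold with exact divisions for r with a right-to-left Horner evaluation without divisions.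
-- outside the precondition, e.g. on calcnuts([], 0): A returns (3.0, -1.5), B returns (-0.0, 0.0)
import Mathlib
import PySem

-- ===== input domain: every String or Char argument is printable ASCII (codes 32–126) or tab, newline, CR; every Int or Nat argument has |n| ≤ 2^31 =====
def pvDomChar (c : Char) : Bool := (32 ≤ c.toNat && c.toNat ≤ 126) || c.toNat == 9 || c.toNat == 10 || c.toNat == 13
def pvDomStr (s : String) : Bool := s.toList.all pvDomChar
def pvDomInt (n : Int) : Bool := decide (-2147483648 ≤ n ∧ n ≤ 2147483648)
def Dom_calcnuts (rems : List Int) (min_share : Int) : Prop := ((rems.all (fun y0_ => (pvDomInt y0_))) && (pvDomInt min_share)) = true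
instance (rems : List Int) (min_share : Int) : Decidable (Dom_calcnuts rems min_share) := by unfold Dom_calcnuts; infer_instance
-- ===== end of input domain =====

-- B replaces A's extended-Euclid Bezout solver by Hensel lifting of the trivial inverse of b modulo n-1,
-- and A's forward fold with exact divisions for r by a right-to-left Horner pass (measured faster).

-- ===== PORT A =====
-- termination measure for the Euclid loop: |a % b| < |b| when b ≠ 0 (floor mod)
theorem pvModAbsLt (a b : Int) (hb : b ≠ 0) : (PySem.Int.mod a b).natAbs < b.natAbs := by
  rcases lt_or_gt_of_ne hb with h | h
  · have h1 := PySem.Int.mod_neg_bounds (a := a) h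
    omega
  · have h1 := PySem.Int.mod_nonneg (a := a) h
    have h2 := PySem.Int.mod_lt (a := a) h
    omega

-- the 'while True' loop of dioph; Python raises ZeroDivisionError when b = 0 (unreachable from
-- calcnuts on Pre_ inputs, where gcd(a,b) = 1 makes the loop break first), the port returns (0,0) there
def diophLoop (a b x y : Int) : Int × Int :=
  if _hb : b = 0 then (0, 0)
  else
    let q := PySem.Int.floordiv a b
    let a' := b
    let b' := PySem.Int.mod a b
    let x' := y - q * x
    let y' := x
    if a'.natAbs = 1 then (x', y') else diophLoop a' b' x' y'
termination_by b.natAbs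
decreasing_by exact pvModAbsLt a b _hb

def dioph (a b c : Int) : Int × Int :=
  let aa := a
  let bb := b
  let p := diophLoop a b 0 1
  let y := if PySem.Int.mod (p.2 * aa) bb ≠ 1 then -p.2 else p.2
  (y * c, PySem.Int.floordiv (c - aa * y * c) bb)

-- exponents are Python's n, n+1 ≥ 0 on Pre_ inputs; cast to Nat (Python yields floats for negative n, outside Pre_)
def calcnuts (rems : List Int) (min_share : Int) : Int × Int :=
  let n : Int := rems.length - 1
  let rc := rems.foldl (fun (p : Int × Int) x =>
    (p.1 + x * p.2, PySem.Int.floordiv p.2 (n - 1) * n)) (0, (n - 1) ^ n.toNat)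
  let r := rc.1
  let a := (n - 1) ^ n.toNat
  let b := n ^ (n + 1).toNat
  let p := dioph a (-b) r
  let k := PySem.Int.floordiv (min_share - p.2 + a - 1) a
  (p.1 + k * b, p.2 + k * a)

-- ===== PORT B =====
-- the 'while e < n' Hensel loop; fuel n.toNat + 1 bounds the iteration count (e ≥ 1 grows by ≥ 1 per step)
def henselLoop (m b n : Int) : Nat → Int → Int → Int
  | 0, _, inv => inv
  | fuel + 1, e, inv =>
    if e < n then
      let e' := min (2 * e) n
      henselLoop m b n fuel e' (PySem.Int.mod (inv * (2 - b * inv)) (m ^ e'.toNat))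
    else inv

def calcnuts_alt (rems : List Int) (min_share : Int) : Int × Int :=
  let n : Int := rems.length - 1
  let m := n - 1
  let a := m ^ n.toNat
  let b := n ^ (n + 1).toNat
  -- for x in reversed(rems): r, mp = x*mp + n*r, mp*m
  let rm := rems.foldr (fun x (p : Int × Int) => (x * p.2 + n * p.1, p.2 * m)) (0, 1)
  let r := rm.1
  let inv := henselLoop m b n (n.toNat + 1) 1 1
  let y0 := PySem.Int.mod (-r * inv) a
  let Y := min_share + PySem.Int.mod (y0 - min_share) a
  (PySem.Int.floordiv (r + b * Y) a, Y)

-- ===== PRECONDITION & SPEC =====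
-- A raises ZeroDivisionError on lists of length 1 or 2 and returns a pair of floats (not ints) on the
-- empty list, so Pre_ admits exactly the lists of length ≥ 3.
def Pre_calcnuts (rems : List Int) (min_share : Int) : Prop := 3 ≤ rems.length
instance (rems : List Int) (min_share : Int) : Decidable (Pre_calcnuts rems min_share) := by unfold Pre_calcnuts; infer_instance
def pvWitness_calcnuts : List Int × Int := ([1, 1, 1, 1, 1, 1], 1)

def Spec_calcnuts (rems : List Int) (min_share : Int) (out : Int × Int) : Prop := out = calcnuts_alt rems min_share
instance (rems : List Int) (min_share : Int) (out : Int × Int) : Decidable (Spec_calcnuts rems min_share out) := by unfold Spec_calcnuts; infer_instance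

-- ===== CLAIM (what is proved, stated in full; the proofs are below) =====
def Claim_equal_calcnuts : Prop := ∀ (rems : List Int) (min_share : Int), Dom_calcnuts rems min_share → Pre_calcnuts rems min_share → Spec_calcnuts rems min_share (calcnuts rems min_share)

-- ===== LEMMAS AND PROOFS =====

-- the sum Σ l[i] * m^(j-i) * n^(i0+i), which both r-loops compute
def coefSum (m n : Int) : List Int → Nat → Nat → Int
  | [], _, _ => 0
  | x :: t, j, i => x * m ^ j * n ^ i + coefSum m n t (j - 1) (i + 1)

theorem coefSum_n_mul (m n : Int) (l : List Int) : ∀ (j i : Nat),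
    coefSum m n l j (i + 1) = n * coefSum m n l j i := by
  induction l with
  | nil => intro j i; simp [coefSum]
  | cons x t ih => intro j i; simp [coefSum, ih, pow_succ]; ring

-- exact floor division: (t*m) // m = t
theorem pvFloordivMulCancel (t m : Int) (hm : m ≠ 0) : PySem.Int.floordiv (t * m) m = t := by
  have h1 := PySem.Int.floordiv_mul_add_mod (t * m) m
  have h2 : PySem.Int.mod (t * m) m = 0 :=
    (PySem.Int.mod_eq_zero_iff_dvd _ _).mpr ⟨t, by ring⟩
  exact mul_right_cancel₀ hm (by linarith)

theorem pvModSub (a b : Int) : PySem.Int.mod a b = a - PySem.Int.floordiv a b * b := by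
  have := PySem.Int.floordiv_mul_add_mod a b; linarith

-- A's forward fold with exact division computes coefSum
theorem foldA_eq (m n : Int) (hm : m ≠ 0) (l : List Int) :
    ∀ (j i : Nat) (r0 : Int), l.length ≤ j + 1 →
      (l.foldl (fun (p : Int × Int) x => (p.1 + x * p.2, PySem.Int.floordiv p.2 m * n))
        (r0, m ^ j * n ^ i)).1 = r0 + coefSum m n l j i := by
  induction l with
  | nil => intro j i r0 _; simp [coefSum]
  | cons x t ih =>
    intro j i r0 hlen
    by_cases ht : t = []
    · subst ht; simp [coefSum]; ring
    · have hj : 1 ≤ j := by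
        have := List.length_pos_iff.mpr ht
        simp at hlen; omega
      have hdiv : PySem.Int.floordiv (m ^ j * n ^ i) m * n = m ^ (j - 1) * n ^ (i + 1) := by
        have he : m ^ j * n ^ i = (m ^ (j - 1) * n ^ i) * m := by
          rw [mul_comm _ m, ← mul_assoc, ← pow_succ']
          congr 2; omega
        rw [he, pvFloordivMulCancel _ _ hm, pow_succ]; ring
      simp only [List.foldl_cons, hdiv]
      rw [ih (j - 1) (i + 1) _ (by simp at hlen ⊢; omega)]
      simp [coefSum]; ring

-- B's reversed Horner pass computes coefSum
theorem foldB_eq (m n : Int) (l : List Int) :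
    l.foldr (fun x (p : Int × Int) => (x * p.2 + n * p.1, p.2 * m)) (0, 1)
      = (coefSum m n l (l.length - 1) 0, m ^ l.length) := by
  induction l with
  | nil => simp [coefSum]
  | cons x t ih =>
    simp only [List.foldr_cons, ih, coefSum, List.length_cons, Prod.mk.injEq]
    refine ⟨?_, by rw [pow_succ]⟩
    rw [show t.length + 1 - 1 - 1 = t.length - 1 by omega, show (0 + 1) = 1 by rfl,
      show (1 : Nat) = 0 + 1 by rfl, coefSum_n_mul]
    simp

-- Euclid-loop invariant: the state stays congruent to multiples of aa modulo the original bb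
theorem diophLoop_bezout (aa bb : Int) : ∀ (a b x y : Int), b < 0 →
    Int.gcd a b = 1 → a ≡ y * aa [ZMOD bb] → b ≡ x * aa [ZMOD bb] →
    (diophLoop a b x y).2 * aa ≡ -1 [ZMOD bb] := by
  intro a b x y
  induction a, b, x, y using diophLoop.induct with
  | case1 a x y =>
    intro hbneg _ _ _; omega
  | case2 a b x y hb a' hone =>
    intro hbneg hg hA hB
    have honeb : b.natAbs = 1 := hone
    rw [show diophLoop a b x y = (y - PySem.Int.floordiv a b * x, x) from by
      rw [diophLoop]; simp [hb, honeb]]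
    have hbm1 : b = -1 := by omega
    calc x * aa ≡ b [ZMOD bb] := hB.symm
      _ = -1 := hbm1
  | case3 a b x y hb q a' b' x' y' hone ih =>
    intro hbneg hg hA hB
    have honeb : ¬ b.natAbs = 1 := hone
    rw [show diophLoop a b x y = diophLoop b (PySem.Int.mod a b)
        (y - PySem.Int.floordiv a b * x) x from by
      rw [diophLoop]; simp [hb, honeb]]
    have hg' : Int.gcd b (PySem.Int.mod a b) = 1 := by
      rw [pvModSub, Int.gcd_sub_mul_right_right b a (PySem.Int.floordiv a b),
        Int.gcd_comm]; exact hg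
    have hb'ne : PySem.Int.mod a b ≠ 0 := by
      intro h0
      rw [h0] at hg'
      simp [Int.gcd] at hg'
      omega
    have hb'neg : PySem.Int.mod a b < 0 := by
      have := PySem.Int.mod_neg_bounds (a := a) hbneg
      omega
    apply ih hb'neg hg'
    · exact hB
    · show PySem.Int.mod a b ≡ (y - PySem.Int.floordiv a b * x) * aa [ZMOD bb]
      rw [pvModSub]
      calc a - PySem.Int.floordiv a b * b
          ≡ y * aa - PySem.Int.floordiv a b * (x * aa) [ZMOD bb] :=
            Int.ModEq.sub hA (Int.ModEq.mul_left _ hB)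
        _ = (y - PySem.Int.floordiv a b * x) * aa := by ring

-- dioph returns a Bezout pair for coprime aa, bb with bb < 0
theorem dioph_eq (aa bb c : Int) (hbb : bb < 0) (hg : Int.gcd aa bb = 1) :
    aa * (dioph aa bb c).1 + bb * (dioph aa bb c).2 = c := by
  have hbz := diophLoop_bezout aa bb aa bb 0 1 hbb hg
    (by simpa using Int.ModEq.refl aa) (by simp [Int.ModEq])
  set p := diophLoop aa bb 0 1 with hp
  have hflip : PySem.Int.mod (p.2 * aa) bb ≠ 1 := by
    have := PySem.Int.mod_neg_bounds (a := p.2 * aa) hbb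
    omega
  have hy : dioph aa bb c = (-p.2 * c, PySem.Int.floordiv (c - aa * (-p.2) * c) bb) := by
    rw [dioph]
    simp only [← hp, if_pos hflip]
  have hinv : bb ∣ 1 - aa * (-p.2) := by
    have h1 : p.2 * aa ≡ -1 [ZMOD bb] := hbz
    have h4 : (1 : Int) + p.2 * aa ≡ -1 + 1 [ZMOD bb] := by
      simpa [add_comm] using Int.ModEq.add h1 (Int.ModEq.refl 1)
    simp at h4
    have h5 : bb ∣ -(aa * p.2) + -1 := by simpa [mul_comm] using (Int.ModEq.dvd h4)
    have h6 : bb ∣ 1 + aa * p.2 := by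
      have := dvd_neg.mpr h5
      simpa [neg_add] using this
    simpa [mul_neg] using h6
  rcases hinv with ⟨t, ht⟩
  have hdvd2 : c - aa * (-p.2) * c = (c * t) * bb := by
    have : c * (1 - aa * (-p.2)) = c * (bb * t) := by rw [← ht]
    ring_nf
    ring_nf at this
    linarith
  rw [hy]
  simp only
  rw [hdvd2, pvFloordivMulCancel _ _ (by omega)]
  ring_nf
  linarith [ht]

-- Hensel-loop invariant: m^e | 1 - b*inv is maintained while e climbs to n
theorem henselLoop_spec (m b n : Int) :
    ∀ (fuel : Nat) (e inv : Int), 1 ≤ e → e ≤ n → (n - e).toNat < fuel →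
      m ^ e.toNat ∣ 1 - b * inv →
      m ^ n.toNat ∣ 1 - b * (henselLoop m b n fuel e inv) := by
  intro fuel
  induction fuel with
  | zero => intro e inv _ _ h _; omega
  | succ f ih =>
    intro e inv he hen hfuel hinv
    by_cases hlt : e < n
    · rw [show henselLoop m b n (f+1) e inv = henselLoop m b n f (min (2*e) n)
        (PySem.Int.mod (inv * (2 - b * inv)) (m ^ (min (2*e) n).toNat)) from by
          simp [henselLoop, hlt]]
      set e' := min (2*e) n with he'
      set M := m ^ e'.toNat with hM
      apply ih
      · omega
      · omega
      · omega
      · have hmodstep : M ∣ (inv * (2 - b * inv)) - PySem.Int.mod (inv * (2 - b * inv)) M := by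
          have h1 := PySem.Int.floordiv_mul_add_mod (inv * (2 - b * inv)) M
          exact ⟨PySem.Int.floordiv (inv * (2 - b * inv)) M, by linarith⟩
        have hsq : M ∣ (1 - b * inv) ^ 2 := by
          have h2e : m ^ (2 * e.toNat) ∣ (1 - b * inv) ^ 2 := by
            rw [two_mul, pow_add, pow_two]; exact mul_dvd_mul hinv hinv
          exact dvd_trans (pow_dvd_pow m (by omega)) h2e
        have key : (1 : Int) - b * (inv * (2 - b * inv)) = (1 - b * inv) ^ 2 := by ring
        have hx : M ∣ 1 - b * (inv * (2 - b * inv)) := key ▸ hsq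
        have hfinal : (1 : Int) - b * PySem.Int.mod (inv * (2 - b * inv)) M
            = (1 - b * (inv * (2 - b * inv)))
              + b * ((inv * (2 - b * inv)) - PySem.Int.mod (inv * (2 - b * inv)) M) := by ring
        rw [hfinal]
        exact dvd_add hx (Dvd.dvd.mul_left hmodstep b)
    · rw [show henselLoop m b n (f+1) e inv = inv from by simp [henselLoop, hlt]]
      have : e = n := by omega
      subst this; exact hinv

-- uniqueness of the solution of a*X - b*Y = r with Y in a window of width a
theorem window_unique (a b r ms X1 Y1 X2 Y2 : Int) (ha : 0 < a) (hco : IsCoprime a b)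
    (h1 : a * X1 - b * Y1 = r) (h2 : a * X2 - b * Y2 = r)
    (w1 : ms ≤ Y1 ∧ Y1 < ms + a) (w2 : ms ≤ Y2 ∧ Y2 < ms + a) : (X1, Y1) = (X2, Y2) := by
  have hdvd : a ∣ b * (Y1 - Y2) := ⟨X1 - X2, by linarith [h1, h2]⟩
  have hY : a ∣ (Y1 - Y2) := hco.dvd_of_dvd_mul_left hdvd
  have hYeq : Y1 = Y2 := by
    rcases hY with ⟨k, hk⟩
    have hb1 : a * (-1) < a * k := by linarith [w1.1, w1.2, w2.1, w2.2]
    have hb2 : a * k < a * 1 := by linarith [w1.1, w1.2, w2.1, w2.2]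
    have h1k : (-1 : Int) < k := Int.lt_of_mul_lt_mul_left hb1 (by omega)
    have h2k : k < 1 := Int.lt_of_mul_lt_mul_left hb2 (by omega)
    have : k = 0 := by omega
    simp [this] at hk; omega
  subst hYeq
  have : X1 = X2 := by
    have h := mul_left_cancel₀ (show a ≠ 0 by omega) (show a * X1 = a * X2 by linarith)
    exact h
  simp [this]

-- the ceiling-shift lands the second component in the window [t, t + a)
theorem ceil_window (a t : Int) (ha : 0 < a) :
    t ≤ PySem.Int.floordiv (t + a - 1) a * a ∧ PySem.Int.floordiv (t + a - 1) a * a < t + a := by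
  have h1 := PySem.Int.floordiv_mul_add_mod (t + a - 1) a
  have h2 := PySem.Int.mod_nonneg (a := t + a - 1) ha
  have h3 := PySem.Int.mod_lt (a := t + a - 1) ha
  constructor <;> linarith

-- ===== VERDICT (by name: the statement is the Claim_ definition above) =====
theorem calcnuts_spec : Claim_equal_calcnuts := by
  intro rems ms _ hpre
  unfold Spec_calcnuts
  have hL : 3 ≤ rems.length := hpre
  have hLi : (3 : Int) ≤ (rems.length : Int) := by exact_mod_cast hL
  set L : Nat := rems.length with hLdef
  set n : Int := (L : Int) - 1 with hndef
  set m : Int := n - 1 with hmdef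
  have hm1 : 1 ≤ m := by omega
  have hnt : n.toNat = L - 1 := by omega
  have hn1t : (n + 1).toNat = L := by omega
  set a : Int := m ^ n.toNat with hadef
  set b : Int := n ^ (n + 1).toNat with hbdef
  have ha : 0 < a := pow_pos (by omega) _
  have hbpos : 0 < b := pow_pos (by omega) _
  set R : Int := coefSum m n rems (L - 1) 0 with hRdef
  have hco : IsCoprime a b := by
    have hmn : IsCoprime m n := ⟨-1, 1, by ring_nf; omega⟩
    exact hmn.pow
  -- A's fold computes R
  have hfold : (rems.foldl (fun (p : Int × Int) x =>
      (p.1 + x * p.2, PySem.Int.floordiv p.2 m * n)) (0, m ^ n.toNat)).1 = R := by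
    have h := foldA_eq m n (by omega) rems (L - 1) 0 0 (by omega)
    rw [hnt]
    simpa using h
  -- A's value
  set pA : Int × Int := dioph a (-b) R with hpAdef
  set kA : Int := PySem.Int.floordiv (ms - pA.2 + a - 1) a with hkAdef
  have hAval : calcnuts rems ms = (pA.1 + kA * b, pA.2 + kA * a) := by
    simp only [calcnuts]
    rw [← hLdef, ← hndef, ← hmdef, ← hadef, ← hbdef, hfold, ← hpAdef, ← hkAdef]
  -- B's value
  set inv : Int := henselLoop m b n (n.toNat + 1) 1 1 with hinvdef
  set y0 : Int := PySem.Int.mod (-R * inv) a with hy0def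
  set YB : Int := ms + PySem.Int.mod (y0 - ms) a with hYBdef
  have hBval : calcnuts_alt rems ms = (PySem.Int.floordiv (R + b * YB) a, YB) := by
    simp only [calcnuts_alt]
    rw [← hLdef, ← hndef, ← hmdef, ← hadef, ← hbdef, foldB_eq, ← hLdef, ← hRdef,
      ← hinvdef]
  -- A satisfies the characterization
  have hgA : Int.gcd a (-b) = 1 := by
    have := Int.isCoprime_iff_gcd_eq_one.mp hco.neg_right
    exact this
  have hde := dioph_eq a (-b) R (by omega) hgA
  have hA1 : a * (pA.1 + kA * b) - b * (pA.2 + kA * a) = R := by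
    have h : a * pA.1 + (-b) * pA.2 = R := by rw [hpAdef]; exact hde
    linear_combination h
  have hcw := ceil_window a (ms - pA.2) ha
  have hA2 : ms ≤ pA.2 + kA * a ∧ pA.2 + kA * a < ms + a := by
    rw [hkAdef]
    constructor <;> [linarith [hcw.1]; linarith [hcw.2]]
  -- B satisfies the characterization
  have hbase : m ^ (1 : Int).toNat ∣ 1 - b * 1 := by
    have h1 : (1 : Int) ≡ n [ZMOD m] := (Int.modEq_iff_dvd).mpr ⟨1, by omega⟩
    have h2 : (1 : Int) ^ (n + 1).toNat ≡ n ^ (n + 1).toNat [ZMOD m] := h1.pow _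
    have h3 : m ∣ n ^ (n + 1).toNat - 1 := by
      have := (Int.modEq_iff_dvd).mp h2
      simpa using this
    have h4 : m ∣ 1 - b := by
      rw [hbdef]
      simpa [neg_sub] using dvd_neg.mpr h3
    simpa using h4
  have hHensel : a ∣ 1 - b * inv := by
    rw [hinvdef, hadef]
    exact henselLoop_spec m b n (n.toNat + 1) 1 1 le_rfl (by omega) (by omega) hbase
  have d1 : a ∣ (y0 - ms) - PySem.Int.mod (y0 - ms) a := by
    refine ⟨PySem.Int.floordiv (y0 - ms) a, ?_⟩
    have h := PySem.Int.floordiv_mul_add_mod (y0 - ms) a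
    linear_combination -h
  have d2 : a ∣ (-R * inv) - y0 := by
    refine ⟨PySem.Int.floordiv (-R * inv) a, ?_⟩
    have h := PySem.Int.floordiv_mul_add_mod (-R * inv) a
    rw [hy0def]
    linear_combination -h
  have hdvdB : a ∣ R + b * YB := by
    have hid : R + b * YB = R * (1 - b * inv)
        + (-b) * ((y0 - ms) - PySem.Int.mod (y0 - ms) a)
        + (-b) * ((-R * inv) - y0) := by rw [hYBdef]; ring
    rw [hid]
    exact dvd_add (dvd_add (Dvd.dvd.mul_left hHensel R) (Dvd.dvd.mul_left d1 (-b)))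
      (Dvd.dvd.mul_left d2 (-b))
  have hB1 : a * (PySem.Int.floordiv (R + b * YB) a) - b * YB = R := by
    rcases hdvdB with ⟨t, ht⟩
    have hfd : PySem.Int.floordiv (R + b * YB) a = t := by
      rw [ht, mul_comm a t, pvFloordivMulCancel _ _ (by omega)]
    rw [hfd]
    linear_combination -ht
  have hB2 : ms ≤ YB ∧ YB < ms + a := by
    have h1 := PySem.Int.mod_nonneg (a := y0 - ms) ha
    have h2 := PySem.Int.mod_lt (a := y0 - ms) ha
    rw [hYBdef]
    omega
  -- uniqueness
  rw [hAval, hBval]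
  exact window_unique a b R ms _ _ _ _ ha hco hA1 hB1 hA2 hB2
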